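-- pv_equiv track=rewrite | github.com/davidxiang101/race_ws | src/follow/src/gap_finder.py | find_max_gap
-- ===== SOURCE A (Python) =====
-- def find_max_gap(free_space_ranges):
--     max_length = max(free_space_ranges)
--     max_gap_straightest_ind = 0
--     closest_dist_to_mid = len(free_space_ranges)
--     mid = len(free_space_ranges) >> 1
--
--     for i, num in enumerate(free_space_ranges):
--         if num == max_length:
--             if abs(mid - i) < closest_dist_to_mid:
--                 closest_dist_to_mid = abs(mid - i)
--                 max_gap_straightest_ind = i
--     return max_gap_straightest_ind
-- ===== SOURCE B (Python) =====
-- def find_max_gap(free_space_ranges):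
--     # Spiral search outward from the middle: first index (left offset before
--     # right at each distance) holding the maximum is the answer.
--     max_length = max(free_space_ranges)
--     n = len(free_space_ranges)
--     mid = n >> 1
--     for d in range(n + 1):
--         i = mid - d
--         if 0 <= i and free_space_ranges[i] == max_length:
--             return i
--         j = mid + d
--         if j < n and free_space_ranges[j] == max_length:
--             return j
-- ===== Notes on version B (the rewrite author's own statement) =====
-- stated objective: alternative
-- what changed: Replaces A's full left-to-right running-argmin scan over enumerate() with an early-terminating spiral search outward from the middle index (left offset before right at each distance), returning at the first maximal element found.
import Mathlib
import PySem

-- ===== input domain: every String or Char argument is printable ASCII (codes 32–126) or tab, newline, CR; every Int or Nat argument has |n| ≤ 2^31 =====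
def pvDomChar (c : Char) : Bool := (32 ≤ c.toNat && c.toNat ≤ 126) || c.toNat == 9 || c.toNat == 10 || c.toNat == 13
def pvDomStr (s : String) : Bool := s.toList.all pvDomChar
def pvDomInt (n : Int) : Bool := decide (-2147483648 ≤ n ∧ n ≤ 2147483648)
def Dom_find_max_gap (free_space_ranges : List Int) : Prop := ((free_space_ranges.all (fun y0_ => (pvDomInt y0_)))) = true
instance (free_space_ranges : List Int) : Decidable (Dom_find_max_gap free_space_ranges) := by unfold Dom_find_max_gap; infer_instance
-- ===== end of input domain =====

-- B replaces A's full left-to-right running-argmin scan by an early-terminating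
-- spiral search outward from the middle index (objective: alternative decomposition).

-- ===== PORT A =====
-- the loop body of A: update (closest_dist_to_mid, max_gap_straightest_ind) on a strict improvement
def stepA (M mid : Int) (st : Int × Int) (p : Int × Int) : Int × Int :=
  if p.2 = M then (if |mid - p.1| < st.1 then (|mid - p.1|, p.1) else st) else st

def find_max_gap (free_space_ranges : List Int) : Int :=
  match PySem.List.max? free_space_ranges (fun y => y) with
  | none => 0  -- unreachable under Pre_: Python's max([]) raises ValueError
  | some max_length =>
    let mid : Int := (PySem.List.len free_space_ranges) >>> 1
    let st := (PySem.List.enumerate free_space_ranges 0).foldl (stepA max_length mid)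
      (PySem.List.len free_space_ranges, 0)
    st.2

-- ===== PORT B =====
-- the spiral loop of B: at distance d try mid-d (if 0 ≤ it), then mid+d (if < n);
-- fuel counts the remaining iterations of `for d in range(n+1)` (0 = loop exhausted, unreachable under Pre_)
def spiralGo (xs : List Int) (M mid : Int) : Nat → Nat → Int
  | _, 0 => 0
  | d, fuel+1 =>
    if 0 ≤ mid - (d : Int) ∧ PySem.List.pyGetD xs (mid - (d : Int)) 0 = M then mid - (d : Int)
    else if mid + (d : Int) < PySem.List.len xs ∧ PySem.List.pyGetD xs (mid + (d : Int)) 0 = M then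
      mid + (d : Int)
    else spiralGo xs M mid (d+1) fuel

def find_max_gap_alt (free_space_ranges : List Int) : Int :=
  match PySem.List.max? free_space_ranges (fun y => y) with
  | none => 0  -- unreachable under Pre_: Python's max([]) raises ValueError
  | some max_length =>
    let mid : Int := (PySem.List.len free_space_ranges) >>> 1
    spiralGo free_space_ranges max_length mid 0 (free_space_ranges.length + 1)

-- ===== PRECONDITION & SPEC =====
-- Pre_ excludes only the empty list, on which Python's max() raises ValueError in both A and B.
def Pre_find_max_gap (free_space_ranges : List Int) : Prop := free_space_ranges ≠ []
instance (free_space_ranges : List Int) : Decidable (Pre_find_max_gap free_space_ranges) := by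
  unfold Pre_find_max_gap; infer_instance

def pvWitness_find_max_gap : List Int := [5, 2, 5, 1]

def Spec_find_max_gap (free_space_ranges : List Int) (out : Int) : Prop := out = find_max_gap_alt free_space_ranges
instance (free_space_ranges : List Int) (out : Int) : Decidable (Spec_find_max_gap free_space_ranges out) := by unfold Spec_find_max_gap; infer_instance

-- ===== CLAIM (what is proved, stated in full; the proofs are below) =====
def Claim_equal_find_max_gap : Prop := ∀ (free_space_ranges : List Int), Dom_find_max_gap free_space_ranges → Pre_find_max_gap free_space_ranges → Spec_find_max_gap free_space_ranges (find_max_gap free_space_ranges)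

-- ===== LEMMAS AND PROOFS =====

-- the index both programs must return: a maximal element, at minimal |mid - ·| distance,
-- and the smallest index among maximal elements at that distance
def GoodIdx (xs : List Int) (M mid : Int) (k : Nat) : Prop :=
  ∃ hk : k < xs.length, xs[k]'hk = M ∧
    (∀ (k' : Nat) (h : k' < xs.length), xs[k']'h = M → |mid - (k : Int)| ≤ |mid - (k' : Int)|) ∧
    (∀ (k' : Nat) (h : k' < xs.length), xs[k']'h = M →
      |mid - (k' : Int)| = |mid - (k : Int)| → k ≤ k')

lemma mid_val (n : Nat) : ((n : Int)) >>> 1 = ((n / 2 : Nat) : Int) := by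
  exact Int.mem_toNat?.mp rfl

-- characterization of A's fold: its first component only shrinks, bounds the distance of
-- every maximal element seen, and on any strict improvement the result is the first index
-- realizing the final (minimal) distance
lemma foldA_char (M mid : Int) (l : List Int) :
    ∀ (s c r : Int),
    ((PySem.List.enumerate l s).foldl (stepA M mid) (c, r)).1 ≤ c ∧
    (∀ (k : Nat) (hk : k < l.length), l[k]'hk = M →
      ((PySem.List.enumerate l s).foldl (stepA M mid) (c, r)).1 ≤ |mid - (s + k)|) ∧
    ((PySem.List.enumerate l s).foldl (stepA M mid) (c, r) = (c, r) ∨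
      ∃ (k : Nat) (hk : k < l.length), l[k]'hk = M ∧
        (PySem.List.enumerate l s).foldl (stepA M mid) (c, r) = (|mid - (s + k)|, s + k) ∧
        |mid - (s + k)| < c ∧
        ∀ (k' : Nat) (hk' : k' < l.length), k' < k → l[k']'hk' = M →
          |mid - (s + k)| < |mid - (s + k')|) := by
  induction l with
  | nil => intro s c r; simp [PySem.List.enumerate_nil]
  | cons x t ih =>
    intro s c r
    rw [PySem.List.enumerate_cons]
    simp only [List.foldl_cons]
    by_cases hx : x = M
    · by_cases himp : |mid - s| < c
      · -- the head strictly improves the accumulator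
        have hstep : stepA M mid (c, r) (s, x) = (|mid - s|, s) := by
          simp [stepA, hx, himp]
        rw [hstep]
        obtain ⟨h1, h2, h3⟩ := ih (s+1) (|mid - s|) s
        refine ⟨le_of_lt (lt_of_le_of_lt h1 himp), ?_, ?_⟩
        · intro k hk hkM
          cases k with
          | zero => simpa using h1
          | succ k =>
            have := h2 k (by simpa using hk) (by simpa using hkM)
            have harith : s + 1 + (k:Int) = s + ((k:Nat)+1 : Nat) := by push_cast; ring
            rw [harith] at this
            exact this
        · rcases h3 with heq | ⟨k, hk, hkM, hout, hlt, hfirst⟩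
          · right
            refine ⟨0, by simp, by simpa using hx, ?_, by simpa using himp, ?_⟩
            · simpa using heq
            · intro k' hk' hk0 _; omega
          · right
            refine ⟨k+1, by simpa using hk, by simpa using hkM, ?_, ?_, ?_⟩
            · have harith : s + 1 + (k:Int) = s + ((k:Nat)+1 : Nat) := by push_cast; ring
              rw [← harith]; exact hout
            · have harith : s + 1 + (k:Int) = s + ((k:Nat)+1 : Nat) := by push_cast; ring
              rw [← harith]; exact lt_trans hlt himp
            · intro k' hk' hlt' hk'M
              have harith : s + 1 + (k:Int) = s + ((k:Nat)+1 : Nat) := by push_cast; ring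
              rw [← harith]
              cases k' with
              | zero =>
                simp only [Nat.cast_zero, add_zero]
                exact hlt
              | succ k' =>
                have := hfirst k' (by simpa using hk') (by omega) (by simpa using hk'M)
                have harith' : s + 1 + (k':Int) = s + ((k':Nat)+1 : Nat) := by push_cast; ring
                rw [← harith']
                exact this
      · -- the head is maximal but does not improve
        have hstep : stepA M mid (c, r) (s, x) = (c, r) := by simp [stepA, hx, himp]
        rw [hstep]
        obtain ⟨h1, h2, h3⟩ := ih (s+1) c r
        refine ⟨h1, ?_, ?_⟩
        · intro k hk hkM
          cases k with
          | zero => simpa using le_trans h1 (le_of_not_gt himp)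
          | succ k =>
            have := h2 k (by simpa using hk) (by simpa using hkM)
            have harith : s + 1 + (k:Int) = s + ((k:Nat)+1 : Nat) := by push_cast; ring
            rw [harith] at this; exact this
        · rcases h3 with heq | ⟨k, hk, hkM, hout, hlt, hfirst⟩
          · left; exact heq
          · right
            have harith : s + 1 + (k:Int) = s + ((k:Nat)+1 : Nat) := by push_cast; ring
            refine ⟨k+1, by simpa using hk, by simpa using hkM, by rw [← harith]; exact hout,
              by rw [← harith]; exact hlt, ?_⟩
            intro k' hk' hlt' hk'M
            rw [← harith]
            cases k' with
            | zero =>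
              simp only [Nat.cast_zero, add_zero]
              exact lt_of_lt_of_le hlt (le_of_not_gt himp)
            | succ k' =>
              have := hfirst k' (by simpa using hk') (by omega) (by simpa using hk'M)
              have harith' : s + 1 + (k':Int) = s + ((k':Nat)+1 : Nat) := by push_cast; ring
              rw [← harith']; exact this
    · -- the head is not maximal: accumulator unchanged
      have hstep : stepA M mid (c, r) (s, x) = (c, r) := by simp [stepA, hx]
      rw [hstep]
      obtain ⟨h1, h2, h3⟩ := ih (s+1) c r
      refine ⟨h1, ?_, ?_⟩
      · intro k hk hkM
        cases k with
        | zero => exact absurd (by simpa using hkM) hx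
        | succ k =>
          have := h2 k (by simpa using hk) (by simpa using hkM)
          have harith : s + 1 + (k:Int) = s + ((k:Nat)+1 : Nat) := by push_cast; ring
          rw [harith] at this; exact this
      · rcases h3 with heq | ⟨k, hk, hkM, hout, hlt, hfirst⟩
        · left; exact heq
        · right
          have harith : s + 1 + (k:Int) = s + ((k:Nat)+1 : Nat) := by push_cast; ring
          refine ⟨k+1, by simpa using hk, by simpa using hkM, by rw [← harith]; exact hout,
            by rw [← harith]; exact hlt, ?_⟩
          intro k' hk' hlt' hk'M
          rw [← harith]
          cases k' with
          | zero => exact absurd (by simpa using hk'M) hx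
          | succ k' =>
            have := hfirst k' (by simpa using hk') (by omega) (by simpa using hk'M)
            have harith' : s + 1 + (k':Int) = s + ((k':Nat)+1 : Nat) := by push_cast; ring
            rw [← harith']; exact this

lemma A_eq (xs : List Int) (M : Int) (hM : PySem.List.max? xs (fun y => y) = some M)
    (hne : xs ≠ []) :
    ∃ k : Nat, GoodIdx xs M ((xs.length / 2 : Nat) : Int) k ∧ find_max_gap xs = (k : Int) := by
  have hn : 0 < xs.length := List.length_pos_of_ne_nil hne
  have hmem : M ∈ xs := PySem.List.max?_mem hM
  obtain ⟨k0, hk0, hk0M⟩ := List.getElem_of_mem hmem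
  obtain ⟨h1, h2, h3⟩ :=
    foldA_char M ((xs.length / 2 : Nat) : Int) xs 0 (xs.length : Int) 0
  rcases h3 with heq | ⟨k, hk, hkM, hout, hlt, hfirst⟩
  · -- impossible: the maximal element k0 would force the first component below xs.length
    exfalso
    have hle := h2 k0 hk0 hk0M
    rw [heq] at hle
    simp only [zero_add] at hle
    rw [Int.abs_eq_natAbs] at hle
    omega
  · refine ⟨k, ⟨hk, hkM, ?_, ?_⟩, ?_⟩
    · intro k' h hM'
      have := h2 k' h hM'
      rw [hout] at this
      simpa using this
    · intro k' h hM' heqd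
      by_contra hgt
      push Not at hgt
      have := hfirst k' h (by omega) hM'
      simp only [zero_add] at this
      omega
    · simp only [find_max_gap, hM, PySem.List.len_eq, mid_val]
      rw [hout]
      simp

lemma spiralGo_eq (xs : List Int) (M : Int) (midN : Nat) (hmid : midN < xs.length) (k : Nat)
    (hG : GoodIdx xs M (midN : Int) k) :
    ∀ (fuel d : Nat), d ≤ ((midN : Int) - k).natAbs → ((midN : Int) - k).natAbs < d + fuel →
      spiralGo xs M (midN : Int) d fuel = (k : Int) := by
  obtain ⟨hk, hkM, hmin, htie⟩ := hG
  intro fuel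
  induction fuel with
  | zero => intro d h1 h2; omega
  | succ fuel ih =>
    intro d h1 h2
    simp only [spiralGo]
    by_cases hd : d < ((midN : Int) - k).natAbs
    · -- still closer to the middle than the minimal distance: neither candidate is maximal
      have hc1 : ¬ (0 ≤ (midN:Int) - (d:Int) ∧ PySem.List.pyGetD xs ((midN:Int) - (d:Int)) 0 = M) := by
        rintro ⟨hge, hget⟩
        rw [PySem.List.pyGetD_eq_getElem xs 0 hge (by omega)] at hget
        have hmem := hmin ((midN:Int) - (d:Int)).toNat (by omega) hget
        rw [Int.abs_eq_natAbs, Int.abs_eq_natAbs] at hmem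
        omega
      have hc2 : ¬ ((midN:Int) + (d:Int) < PySem.List.len xs ∧ PySem.List.pyGetD xs ((midN:Int) + (d:Int)) 0 = M) := by
        rintro ⟨hlt, hget⟩
        rw [PySem.List.len_eq] at hlt
        rw [PySem.List.pyGetD_eq_getElem xs 0 (by omega) (by omega)] at hget
        have hmem := hmin ((midN:Int) + (d:Int)).toNat (by omega) hget
        rw [Int.abs_eq_natAbs, Int.abs_eq_natAbs] at hmem
        omega
      rw [if_neg hc1, if_neg hc2]
      exact ih (d+1) (by omega) (by omega)
    · -- at the minimal distance: k is mid-d (checked first) or mid+d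
      have hd' : d = ((midN : Int) - k).natAbs := by omega
      by_cases hcase : (k : Int) = (midN:Int) - (d:Int)
      · have hget : PySem.List.pyGetD xs ((midN:Int) - (d:Int)) 0 = M := by
          rw [PySem.List.pyGetD_eq_getElem xs 0 (by omega) (by omega)]
          have : ((midN:Int) - (d:Int)).toNat = k := by omega
          simp only [this]; exact hkM
        rw [if_pos ⟨by omega, hget⟩]
        omega
      · have hkr : (k : Int) = (midN:Int) + (d:Int) := by omega
        have hdpos : 0 < d := by omega
        have hc1 : ¬ (0 ≤ (midN:Int) - (d:Int) ∧ PySem.List.pyGetD xs ((midN:Int) - (d:Int)) 0 = M) := by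
          rintro ⟨hge, hget⟩
          rw [PySem.List.pyGetD_eq_getElem xs 0 hge (by omega)] at hget
          have := htie ((midN:Int) - (d:Int)).toNat (by omega) hget (by
            rw [Int.abs_eq_natAbs, Int.abs_eq_natAbs]; congr 1; omega)
          omega
        have hget : PySem.List.pyGetD xs ((midN:Int) + (d:Int)) 0 = M := by
          rw [PySem.List.pyGetD_eq_getElem xs 0 (by omega) (by omega)]
          have : ((midN:Int) + (d:Int)).toNat = k := by omega
          simp only [this]; exact hkM
        rw [if_neg hc1, if_pos ⟨by simp only [PySem.List.len_eq]; omega, hget⟩]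
        omega

lemma B_eq (xs : List Int) (M : Int) (hM : PySem.List.max? xs (fun y => y) = some M)
    (hne : xs ≠ []) (k : Nat) (hG : GoodIdx xs M ((xs.length / 2 : Nat) : Int) k) :
    find_max_gap_alt xs = (k : Int) := by
  have hn : 0 < xs.length := List.length_pos_of_ne_nil hne
  obtain ⟨hk, -, -, -⟩ := id hG
  simp only [find_max_gap_alt, hM, PySem.List.len_eq, mid_val]
  exact spiralGo_eq xs M (xs.length / 2) (by omega) k hG (xs.length + 1) 0 (by omega) (by omega)

-- ===== VERDICT (by name: the statement is the Claim_ definition above) =====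
theorem find_max_gap_spec : Claim_equal_find_max_gap := by
  intro xs _ hpre
  unfold Spec_find_max_gap
  rcases hM : PySem.List.max? xs (fun y => y) with _ | M
  · exact absurd ((PySem.List.max?_eq_none_iff xs (fun y => y)).mp hM) hpre
  · obtain ⟨k, hG, hA⟩ := A_eq xs M hM hpre
    rw [hA, B_eq xs M hM hpre k hG]
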